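-- pv_equiv track=rewrite | github.com/raeez/chiral-bar-cobar-vol2 | compute/tests/test_climax_theorems_wave7_iv.py | _fm_boundary_strata_count
-- ===== SOURCE A (Python) =====
-- def _fm_boundary_strata_count(n: int) -> int:
--     """FM_n has boundary strata indexed by S-subsets of |S| >= 2."""
--     if n < 2:
--         return 0
--     count = 0
--     total = 2 ** n
--     # Subsets of size >= 2 counted (rough structural check, not actual stratum count)
--     for size in range(2, n + 1):
--         from math import comb
--         count += comb(n, size)
--     return count
-- ===== SOURCE B (Python) =====
-- def _fm_boundary_strata_count(n: int) -> int:
--     """Closed form: sum_{k>=2} C(n,k) = 2**n - n - 1 for n >= 2."""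
--     return 2 ** n - n - 1 if n >= 2 else 0
-- ===== Notes on version B (the rewrite author's own statement) =====
-- stated objective: faster
-- what changed: Replaced the loop summing comb(n,k) for k=2..n by the closed form 2**n - n - 1 (for n >= 2, else 0).
import Mathlib
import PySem

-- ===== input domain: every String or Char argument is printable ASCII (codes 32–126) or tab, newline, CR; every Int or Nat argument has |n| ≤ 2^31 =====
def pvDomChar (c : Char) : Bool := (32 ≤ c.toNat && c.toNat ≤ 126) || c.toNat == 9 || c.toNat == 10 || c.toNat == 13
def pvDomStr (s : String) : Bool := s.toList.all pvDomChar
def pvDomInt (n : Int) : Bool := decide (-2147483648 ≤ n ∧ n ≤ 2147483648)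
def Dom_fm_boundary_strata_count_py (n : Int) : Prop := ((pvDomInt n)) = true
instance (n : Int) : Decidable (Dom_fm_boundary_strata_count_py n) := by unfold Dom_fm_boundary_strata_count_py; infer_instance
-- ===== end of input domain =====

-- B replaces A's loop summing C(n,k) for k=2..n by the closed form 2^n - n - 1 (objective: faster).

-- ===== PORT A =====
-- Literal port: guard n < 2, then a for-loop over range(2, n+1) accumulating comb(n, size).
-- (A's unused local 'total = 2 ** n' has no effect on the result and is omitted.)
-- math.comb(n, size): both arguments are nonnegative in every reached iteration, so Nat.choose is exact here.
def fm_boundary_strata_count_py (n : Int) : Int :=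
  if n < 2 then 0
  else
    (PySem.List.pyRange 2 (n + 1) 1).foldl
      (fun count size => count + (Nat.choose n.toNat size.toNat : Int)) 0

-- ===== PORT B =====
def fm_boundary_strata_count_py_alt (n : Int) : Int :=
  if 2 ≤ n then 2 ^ n.toNat - n - 1 else 0

-- ===== PRECONDITION & SPEC =====
def Spec_fm_boundary_strata_count_py (n : Int) (out : Int) : Prop := out = fm_boundary_strata_count_py_alt n
instance (n : Int) (out : Int) : Decidable (Spec_fm_boundary_strata_count_py n out) := by unfold Spec_fm_boundary_strata_count_py; infer_instance

-- ===== CLAIM (what is proved, stated in full; the proofs are below) =====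
def Claim_equal_fm_boundary_strata_count_py : Prop := ∀ (n : Int), Dom_fm_boundary_strata_count_py n → Spec_fm_boundary_strata_count_py n (fm_boundary_strata_count_py n)

-- ===== LEMMAS AND PROOFS =====

-- The Nat identity behind the closed form: the tail of the binomial row sums to 2^m - m - 1.
lemma sum_choose_tail (m : Nat) (hm : 2 ≤ m) :
    (∑ k ∈ Finset.range (m - 1), Nat.choose m (k + 2)) + m + 1 = 2 ^ m := by
  have h := Nat.sum_range_choose m
  obtain ⟨p, rfl⟩ : ∃ p, m = p + 2 := ⟨m - 2, by omega⟩
  rw [show p + 2 + 1 = (p + 1) + 1 + 1 from rfl] at h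
  rw [Finset.sum_range_succ', Finset.sum_range_succ'] at h
  simp only [Nat.choose_zero_right, Nat.zero_add, Nat.choose_one_right] at h
  simp only [show p + 2 - 1 = p + 1 from rfl]
  omega

-- Folding the accumulating loop equals summing the mapped list.
lemma foldl_add_map {α : Type} (f : α → Int) (l : List α) (c : Int) :
    l.foldl (fun count size => count + f size) c = c + (l.map f).sum := by
  induction l generalizing c with
  | nil => simp
  | cons x xs ih => simp [List.foldl_cons, ih]; ring

lemma sum_map_range_int (f : Nat → Int) (n : Nat) :
    ((List.range n).map f).sum = ∑ k ∈ Finset.range n, f k := by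
  induction n with
  | zero => simp
  | succ n ih => rw [List.range_succ, Finset.sum_range_succ]; simp [ih]

-- ===== VERDICT (by name: the statement is the Claim_ definition above) =====
theorem fm_boundary_strata_count_py_spec : Claim_equal_fm_boundary_strata_count_py := by
  intro n _
  unfold Spec_fm_boundary_strata_count_py fm_boundary_strata_count_py fm_boundary_strata_count_py_alt
  by_cases h : n < 2
  · rw [if_pos h, if_neg (by omega)]
  · rw [if_neg h, if_pos (by omega)]
    obtain ⟨m, rfl⟩ : ∃ m : Nat, n = (m : Int) :=
      ⟨n.toNat, by omega⟩
    have hm : 2 ≤ m := by exact_mod_cast not_lt.mp h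
    rw [PySem.List.pyRange_one]
    have hsub : ((m : Int) + 1 - 2).toNat = m - 1 := by omega
    rw [hsub, List.foldl_map, foldl_add_map, sum_map_range_int]
    have hcast : ∀ k ∈ Finset.range (m - 1),
        ((Nat.choose (Int.toNat (m : Int)) (Int.toNat (2 + (k : Int))) : Int)) =
        ((Nat.choose m (k + 2) : Int)) := by
      intro k _
      have e1 : (Int.toNat (m : Int)) = m := Int.toNat_natCast m
      have e2 : (Int.toNat (2 + (k : Int))) = k + 2 := by omega
      rw [e1, e2]
    rw [Finset.sum_congr rfl hcast]
    have h2 := sum_choose_tail m hm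
    have : ((∑ k ∈ Finset.range (m - 1), Nat.choose m (k + 2) : Nat) : Int)
        = 2 ^ m - m - 1 := by
      have h3 : (((∑ k ∈ Finset.range (m - 1), Nat.choose m (k + 2)) + m + 1 : Nat) : Int)
          = ((2 ^ m : Nat) : Int) := by exact_mod_cast congrArg (Nat.cast : Nat → Int) h2
      push_cast at h3 ⊢
      omega
    push_cast at this ⊢
    simp only [Int.toNat_natCast]
    omega
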